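-- pv_equiv track=rewrite | github.com/YangXiaoo/Lookoop | AlgorithmsPractice/algorithmsPractice-3.py | checkBackup
-- ===== SOURCE A (Python) =====
-- def checkBackup(databseNums):
--     database, backupInfo = [], {}
--     for d in databseNums:
--         if d not in database:
--             database.append(d)
--         backupInfo[d] = backupInfo.get(d, 0) + 1
--
--     for i, d in enumerate(databseNums):
--         if backupInfo[d] == 1:
--             return i
--
--     return -1
-- ===== SOURCE B (Python) =====
-- def checkBackup(databseNums):
--     s = sorted(databseNums)
--     uniques = set()
--     while s:
--         run = 1
--         while run < len(s) and s[run] == s[0]: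
--             run += 1
--         if run == 1:
--             uniques.add(s[0])
--         s = s[run:]
--     for i, d in enumerate(databseNums):
--         if d in uniques:
--             return i
--     return -1
-- ===== Notes on version B (the rewrite author's own statement) =====
-- stated objective: faster
-- what changed: Replaces the membership-list+frequency-dict build with sort-then-group: B sorts a copy, collects the set of values whose run of equal elements in the sorted list has length 1, then returns the first original index whose element is in that set.
import Mathlib
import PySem

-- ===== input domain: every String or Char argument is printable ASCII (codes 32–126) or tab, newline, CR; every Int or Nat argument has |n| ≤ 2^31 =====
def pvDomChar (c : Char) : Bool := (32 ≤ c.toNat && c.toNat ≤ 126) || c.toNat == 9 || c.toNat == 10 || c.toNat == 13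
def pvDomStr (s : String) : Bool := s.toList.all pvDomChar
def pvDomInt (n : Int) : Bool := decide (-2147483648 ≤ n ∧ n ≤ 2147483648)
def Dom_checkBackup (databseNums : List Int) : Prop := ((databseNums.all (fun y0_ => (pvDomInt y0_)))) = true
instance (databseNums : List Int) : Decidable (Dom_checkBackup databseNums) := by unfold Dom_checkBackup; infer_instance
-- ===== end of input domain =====

-- B replaces the dict/list build with sort-then-group: it sorts a copy, collects the values whose
-- run of equal elements has length 1, then scans for the first index whose element is in that set.
-- ===== PORT A =====
-- second loop of A: 'for i, d in enumerate(...): if backupInfo[d] == 1: return i' / 'return -1'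
-- backupInfo[d] is ported as getD _ 0: every scanned d occurs in databseNums, so the key is always
-- present and the lookup never raises (getD equals Python's [] here).
def checkBackupFind (bi : PySem.Dict Int Int) : List (Int × Int) → Int
  | [] => -1
  | (i, d) :: rest => if bi.getD d 0 == 1 then i else checkBackupFind bi rest

def checkBackup (databseNums : List Int) : Int :=
  let st := databseNums.foldl
    (fun (st : List Int × PySem.Dict Int Int) d =>
      let database := if st.1.contains d then st.1 else st.1 ++ [d]
      (database, st.2.insert d (st.2.getD d 0 + 1)))
    ([], PySem.Dict.empty)
  checkBackupFind st.2 (PySem.List.enumerate databseNums 0)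

-- ===== PORT B =====
-- inner while loop: 'run = 1; while run < len(s) and s[run] == s[0]: run += 1' — here
-- run = 1 + runLen s0 rest, the length of the leading run of elements equal to s[0].
def runLen (x : Int) : List Int → Nat
  | [] => 0
  | y :: ys => if y == x then runLen x ys + 1 else 0

-- outer while loop: drop the whole run, adding its value to the set when the run has length 1
def collectUniques : List Int → PySem.Set Int → PySem.Set Int
  | [], u => u
  | x :: rest, u =>
    let r := runLen x rest
    collectUniques (rest.drop r) (if r == 0 then PySem.Set.add u x else u)
termination_by s => s.length
decreasing_by simp

-- final loop: 'for i, d in enumerate(...): if d in uniques: return i' / 'return -1'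
def findUniqueIdx (u : PySem.Set Int) : List (Int × Int) → Int
  | [] => -1
  | (i, d) :: rest => if u.contains d then i else findUniqueIdx u rest

def checkBackup_alt (databseNums : List Int) : Int :=
  let uniques := collectUniques (PySem.List.sorted databseNums (fun x => x) false) PySem.Set.empty
  findUniqueIdx uniques (PySem.List.enumerate databseNums 0)

-- ===== PRECONDITION & SPEC =====
def Spec_checkBackup (databseNums : List Int) (out : Int) : Prop := out = checkBackup_alt databseNums
instance (databseNums : List Int) (out : Int) : Decidable (Spec_checkBackup databseNums out) := by unfold Spec_checkBackup; infer_instance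

-- ===== CLAIM (what is proved, stated in full; the proofs are below) =====
def Claim_equal_checkBackup : Prop := ∀ (databseNums : List Int), Dom_checkBackup databseNums → Spec_checkBackup databseNums (checkBackup databseNums)

-- ===== LEMMAS AND PROOFS =====

-- the dict component of A's build fold is exactly Counter(databseNums)
theorem checkBackup_fold_snd (xs : List Int) (db : List Int) (bi : PySem.Dict Int Int) :
    (xs.foldl
      (fun (st : List Int × PySem.Dict Int Int) d =>
        let database := if st.1.contains d then st.1 else st.1 ++ [d]
        (database, st.2.insert d (st.2.getD d 0 + 1)))
      (db, bi)).2
    = xs.foldl (fun d x => d.insert x (d.getD x 0 + 1)) bi := by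
  induction xs generalizing db bi with
  | nil => rfl
  | cons x xs ih => simp only [List.foldl]; exact ih _ _

-- the prefix counted by runLen is exactly the occurrences of x when the list is sorted and
-- x is a lower bound
theorem runLen_take (x : Int) (l : List Int) :
    l.take (runLen x l) = List.replicate (runLen x l) x := by
  induction l with
  | nil => rfl
  | cons y ys ih =>
    by_cases h : y = x
    · simp [runLen, h, List.replicate, ih]
    · simp [runLen, h]

theorem not_mem_drop_runLen (x : Int) (l : List Int)
    (hs : l.Pairwise (· ≤ ·)) (hlb : ∀ y ∈ l, x ≤ y) :
    x ∉ l.drop (runLen x l) := by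
  induction l with
  | nil => simp
  | cons y ys ih =>
    by_cases h : y = x
    · subst h
      simp only [runLen, beq_self_eq_true, if_pos, List.drop_succ_cons]
      exact ih hs.of_cons (fun z hz => hlb z (List.mem_cons_of_mem _ hz))
    · have hxy : x < y := lt_of_le_of_ne (hlb y (List.mem_cons_self)) (Ne.symm h)
      have hr0 : runLen x (y :: ys) = 0 := by simp [runLen, h]
      rw [hr0, List.drop_zero]
      intro hmem
      rcases List.mem_cons.mp hmem with h1 | h2
      · exact h h1.symm
      · have hy := (List.pairwise_cons.mp hs).1 x h2
        omega

theorem count_drop_runLen (x v : Int) (l : List Int) (hvx : v ≠ x) :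
    (l.drop (runLen x l)).count v = l.count v := by
  conv_rhs => rw [← List.take_append_drop (runLen x l) l]
  rw [List.count_append, runLen_take]
  simp [List.count_replicate]
  exact fun h => absurd h.symm hvx

-- membership in the set built by B's outer loop, for sorted input
theorem mem_collectUniques (s : List Int) (hs : s.Pairwise (· ≤ ·)) (u : PySem.Set Int) (v : Int) :
    v ∈ collectUniques s u ↔ v ∈ u ∨ s.count v = 1 := by
  induction s, u using collectUniques.induct with
  | case1 u => simp [collectUniques]
  | case2 x rest u r ih =>
    have hs' : (rest.drop (runLen x rest)).Pairwise (· ≤ ·) :=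
      List.Pairwise.sublist (List.drop_sublist _ _) hs.of_cons
    have hlb : ∀ y ∈ rest, x ≤ y := (List.pairwise_cons.mp hs).1
    rw [collectUniques]
    refine (ih hs').trans ?_
    show (v ∈ (if (runLen x rest == 0) = true then PySem.Set.add u x else u) ∨
        (rest.drop (runLen x rest)).count v = 1) ↔ (v ∈ u ∨ (x :: rest).count v = 1)
    by_cases hvx : v = x
    · subst hvx
      have h0 : (rest.drop (runLen v rest)).count v = 0 :=
        List.count_eq_zero.mpr (not_mem_drop_runLen v rest hs.of_cons hlb)
      have hc : rest.count v = runLen v rest := by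
        -- count of v in rest: the run prefix is replicate (runLen v rest) v, and v ∉ the drop
        conv_lhs => rw [← List.take_append_drop (runLen v rest) rest]
        rw [List.count_append, runLen_take, List.count_replicate,
          List.count_eq_zero.mpr (not_mem_drop_runLen v rest hs.of_cons hlb)]
        simp
      by_cases hr0 : runLen v rest = 0 <;>
        simp [hr0, h0, PySem.Set.mem_add, hc]
    · have hcd : (rest.drop (runLen x rest)).count v = rest.count v :=
        count_drop_runLen x v rest hvx
      have hxv : ¬ x = v := fun h => hvx h.symm
      by_cases hr0 : runLen x rest = 0 <;>
        simp [hr0, hcd, PySem.Set.mem_add, hvx, hxv]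

-- the two scanning loops agree when the set is exactly {v | count v = 1}
theorem find_eq (xs : List Int) (u : PySem.Set Int)
    (hu : ∀ v, v ∈ u ↔ xs.count v = 1) (e : List (Int × Int)) :
    checkBackupFind (PySem.Dict.counter xs) e = findUniqueIdx u e := by
  induction e with
  | nil => rfl
  | cons p rest ih =>
    obtain ⟨i, d⟩ := p
    by_cases h : xs.count d = 1
    · have hd : d ∈ u := (hu d).mpr h
      simp [checkBackupFind, findUniqueIdx, PySem.Dict.getD_counter, h, hd]
    · have hd : d ∉ u := fun hm => h ((hu d).mp hm)
      have h' : ¬ ((xs.count d : Int) = 1) := by exact_mod_cast h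
      simp [checkBackupFind, findUniqueIdx, PySem.Dict.getD_counter, h', hd, ih]

-- ===== VERDICT (by name: the statement is the Claim_ definition above) =====
theorem checkBackup_spec : Claim_equal_checkBackup := by
  intro xs _
  show checkBackupFind
      (xs.foldl
        (fun (st : List Int × PySem.Dict Int Int) d =>
          let database := if st.1.contains d then st.1 else st.1 ++ [d]
          (database, st.2.insert d (st.2.getD d 0 + 1)))
        ([], PySem.Dict.empty)).2 (PySem.List.enumerate xs 0) = checkBackup_alt xs
  rw [checkBackup_fold_snd, PySem.Dict.foldl_insert_getD_add_one_eq_counter]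
  apply find_eq
  intro v
  rw [mem_collectUniques _ (PySem.List.sorted_pairwise xs (fun x => x) ) PySem.Set.empty v]
  have hp := PySem.List.sorted_perm xs (fun x : Int => x) false
  simp [hp.count_eq, PySem.Set.empty]
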